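-- pv_equiv track=rewrite | github.com/TomasZamastil/wdd130 | personal-site/sudoku_solver.py | column_possible_solutions_besides_selected_cell
-- ===== SOURCE A (Python) =====
-- def correct_square_finder(row, column):
--     if(row < 3 and column < 3):
--         return 0
--     elif(row < 3 and column < 6):
--         return 1
--     elif(row < 3 and column < 9):
--         return 2
--     elif(row < 6 and column < 3):
--         return 3
--     elif(row < 6 and column < 6):
--         return 4
--     elif(row < 6 and column < 9):
--         return 5
--     elif(row < 9 and column < 3):
--         return 6
--     elif(row < 9 and column < 6):
--         return 7
--     elif(row < 9 and column < 9):
--         return 8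
--
-- def square_cells(correct_square):
--     match correct_square:
--         case 0:
--             return [0, 1, 2, 0, 1, 2]
--         case 1:
--             return [0, 1, 2, 3, 4, 5]
--         case 2:
--             return [0, 1, 2, 6, 7, 8]
--         case 3:
--             return [3, 4, 5, 0, 1, 2]
--         case 4:
--             return [3, 4, 5, 3, 4, 5]
--         case 5:
--             return [3, 4, 5, 6, 7, 8]
--         case 6:
--             return [6, 7, 8, 0, 1, 2]
--         case 7:
--             return [6, 7, 8, 3, 4, 5]
--         case 8:
--             return [6, 7, 8, 6, 7, 8]
--
-- def square_contents(correct_square, sudoku_matrix):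
--     coordinates = square_cells(correct_square)
--     contents = [sudoku_matrix[coordinates[0]] [coordinates[3]], sudoku_matrix[coordinates[0]] [coordinates[4]], sudoku_matrix[coordinates[0]] [coordinates[5]], sudoku_matrix[coordinates[1]] [coordinates[3]], sudoku_matrix[coordinates[1]] [coordinates[4]], sudoku_matrix[coordinates[1]] [coordinates[5]], sudoku_matrix[coordinates[2]] [coordinates[3]], sudoku_matrix[coordinates[2]] [coordinates[4]], sudoku_matrix[coordinates[2]] [coordinates[5]], ]
--
--     # This loop removes any zeros - zeros only represent empty fields so we don't need to store those as values present in the square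
--     contents_zeros_removed = []
--     for number in contents:
--         if number != 0:
--             contents_zeros_removed.append(number)
--     return contents_zeros_removed
--
-- def row_contents(row, sudoku_matrix):
--     contents = []
--     for column in range(len(sudoku_matrix)):
--         if(sudoku_matrix[row][column] != 0):
--             contents.append(sudoku_matrix[row][column])
--     return contents
--
-- def column_contents(column, sudoku_matrix):
--     contents = []
--     for row in range(len(sudoku_matrix)):
--         if(sudoku_matrix[row][column] != 0):
--             contents.append(sudoku_matrix[row][column])
--     return contents
--
-- def cell_possible_solutions(sudoku_matrix, row, column):
--     possible_numbers = []
--     for option in range(len(sudoku_matrix) + 1):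
--         if (option != 0) and (option not in column_contents(column, sudoku_matrix)) and (option not in row_contents(row, sudoku_matrix)) and (option not in square_contents(correct_square_finder(row, column), sudoku_matrix)):
--                         possible_numbers.append(option)
--     return possible_numbers
--
-- def column_possible_solutions_besides_selected_cell(sudoku_matrix, row, column):
--     unique_solutions = cell_possible_solutions(sudoku_matrix, row, column)
--     solutions = []
--     for x in range(len(sudoku_matrix)):
--         if sudoku_matrix[x][column] == 0 and x != row:
--             solutions += cell_possible_solutions(sudoku_matrix, x, column)
--     for number in solutions:
--         if number in unique_solutions:
--             unique_solutions.remove(number)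
--     return unique_solutions
-- ===== SOURCE B (Python) =====
-- # B: one pass over the column collects its values and empty rows; the candidate
-- # base list for the shared column is computed once; per-cell candidates come from
-- # a single "used" set (row values + 3x3 block values) with the block located by
-- # band arithmetic instead of A's 9-way square tables; the result filters the
-- # selected cell's candidates by a forbidden set (objective: simpler).
--
-- def _band(i):
--     if i < 3:
--         return 0
--     if i < 6:
--         return 1
--     return 2
--
-- def column_possible_solutions_besides_selected_cell(sudoku_matrix, row, column):
--     n = len(sudoku_matrix)
--     col_vals = set()
--     empties = []
--     for x in range(n):
--         v = sudoku_matrix[x][column]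
--         if v == 0:
--             empties.append(x)
--         else:
--             col_vals.add(v)
--     base = [o for o in range(1, n + 1) if o not in col_vals]
--     if not base:
--         return []
--
--     def candidates(r):
--         used = {sudoku_matrix[r][j] for j in range(n)}
--         rb, cb = 3 * _band(r), 3 * _band(column)
--         for rr in range(rb, rb + 3):
--             for cc in range(cb, cb + 3):
--                 used.add(sudoku_matrix[rr][cc])
--         return [o for o in base if o not in used]
--
--     forbidden = set()
--     for x in empties:
--         if x != row:
--             forbidden.update(candidates(x))
--     return [o for o in candidates(row) if o not in forbidden]
-- ===== Notes on version B (the rewrite author's own statement) =====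
-- stated objective: alternative
-- what changed: B replaces A's per-option helper rescans and 9-way square lookup tables with one pass over the column (collecting its values and empty rows), a single shared candidate base list for the column, per-cell used-sets (row values plus a 3x3 block located by band arithmetic), and a forbidden-set filter instead of A's concatenate-then-remove-in-place pass. Pre_ under-approximates A's return domain in closed form (square grids whose 3x3 blocks fit, with in-range indices, plus grids whose selected column already contains every candidate value, where A returns [] immediately); …
-- outside the precondition, e.g. on column_possible_solutions_besides_selected_cell([[0, 5, -1], [2, 1, 1]], 1, -2): A returns [], B raises IndexError
import Mathlib
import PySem

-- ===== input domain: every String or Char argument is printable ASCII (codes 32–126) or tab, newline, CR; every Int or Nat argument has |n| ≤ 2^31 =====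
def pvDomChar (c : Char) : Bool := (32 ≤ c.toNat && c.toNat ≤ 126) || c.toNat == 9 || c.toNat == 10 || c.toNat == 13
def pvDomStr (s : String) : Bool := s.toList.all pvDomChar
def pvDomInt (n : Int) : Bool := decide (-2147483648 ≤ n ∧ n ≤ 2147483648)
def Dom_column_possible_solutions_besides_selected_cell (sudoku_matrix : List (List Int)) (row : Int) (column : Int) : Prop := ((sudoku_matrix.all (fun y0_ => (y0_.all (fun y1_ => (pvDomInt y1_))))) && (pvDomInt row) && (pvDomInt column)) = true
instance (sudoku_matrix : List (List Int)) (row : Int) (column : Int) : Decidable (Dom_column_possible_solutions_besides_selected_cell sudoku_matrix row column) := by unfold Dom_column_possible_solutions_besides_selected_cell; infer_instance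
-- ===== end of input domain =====

-- B replaces A's per-option helper rescans and 9-way square tables with one column pass,
-- a shared candidate base for the column, per-cell used-sets (row + band-located 3x3 block)
-- and a forbidden-set filter (objective: alternative).

-- ===== PORT A =====
-- Cell access 'sudoku_matrix[r][c]' is ported with pyGetD (default 0 / []): exact wherever
-- Python does not raise IndexError; the raising accesses are excluded by Pre_.
def pvCell (m : List (List Int)) (r c : Int) : Int :=
  PySem.List.pyGetD (PySem.List.pyGetD m r []) c 0

def correct_square_finder (row column : Int) : Int :=
  if row < 3 ∧ column < 3 then 0
  else if row < 3 ∧ column < 6 then 1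
  else if row < 3 ∧ column < 9 then 2
  else if row < 6 ∧ column < 3 then 3
  else if row < 6 ∧ column < 6 then 4
  else if row < 6 ∧ column < 9 then 5
  else if row < 9 ∧ column < 3 then 6
  else if row < 9 ∧ column < 6 then 7
  else if row < 9 ∧ column < 9 then 8
  else 9  -- Python returns None here (later TypeError); unreachable under Pre_

def square_cells (correct_square : Int) : List Int :=
  if correct_square = 0 then [0, 1, 2, 0, 1, 2]
  else if correct_square = 1 then [0, 1, 2, 3, 4, 5]
  else if correct_square = 2 then [0, 1, 2, 6, 7, 8]
  else if correct_square = 3 then [3, 4, 5, 0, 1, 2]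
  else if correct_square = 4 then [3, 4, 5, 3, 4, 5]
  else if correct_square = 5 then [3, 4, 5, 6, 7, 8]
  else if correct_square = 6 then [6, 7, 8, 0, 1, 2]
  else if correct_square = 7 then [6, 7, 8, 3, 4, 5]
  else if correct_square = 8 then [6, 7, 8, 6, 7, 8]
  else []  -- Python returns None here; unreachable under Pre_

def square_contents (correct_square : Int) (sudoku_matrix : List (List Int)) : List Int :=
  let co := square_cells correct_square
  let g : Int → Int := fun i => PySem.List.pyGetD co i 0
  let contents : List Int :=
    [pvCell sudoku_matrix (g 0) (g 3), pvCell sudoku_matrix (g 0) (g 4), pvCell sudoku_matrix (g 0) (g 5),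
     pvCell sudoku_matrix (g 1) (g 3), pvCell sudoku_matrix (g 1) (g 4), pvCell sudoku_matrix (g 1) (g 5),
     pvCell sudoku_matrix (g 2) (g 3), pvCell sudoku_matrix (g 2) (g 4), pvCell sudoku_matrix (g 2) (g 5)]
  contents.foldl (fun acc number => if number ≠ 0 then acc ++ [number] else acc) []

def row_contents (row : Int) (sudoku_matrix : List (List Int)) : List Int :=
  (PySem.List.pyRange 0 (sudoku_matrix.length) 1).foldl
    (fun acc column => if pvCell sudoku_matrix row column ≠ 0 then acc ++ [pvCell sudoku_matrix row column] else acc) []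

def column_contents (column : Int) (sudoku_matrix : List (List Int)) : List Int :=
  (PySem.List.pyRange 0 (sudoku_matrix.length) 1).foldl
    (fun acc row => if pvCell sudoku_matrix row column ≠ 0 then acc ++ [pvCell sudoku_matrix row column] else acc) []

def cell_possible_solutions (sudoku_matrix : List (List Int)) (row : Int) (column : Int) : List Int :=
  (PySem.List.pyRange 0 ((sudoku_matrix.length : Int) + 1) 1).foldl
    (fun acc option =>
      if option ≠ 0 ∧ option ∉ column_contents column sudoku_matrix ∧
         option ∉ row_contents row sudoku_matrix ∧
         option ∉ square_contents (correct_square_finder row column) sudoku_matrix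
      then acc ++ [option] else acc) []

-- A's entry: concatenate the other empty cells' candidates, then remove each occurrence
-- ('unique_solutions.remove(number)' on a present element is List.erase of its first occurrence).
def column_possible_solutions_besides_selected_cell (sudoku_matrix : List (List Int)) (row : Int) (column : Int) : List Int :=
  let unique_solutions := cell_possible_solutions sudoku_matrix row column
  let solutions := (PySem.List.pyRange 0 (sudoku_matrix.length) 1).foldl
    (fun acc x => if pvCell sudoku_matrix x column = 0 ∧ x ≠ row
                  then acc ++ cell_possible_solutions sudoku_matrix x column else acc) []
  solutions.foldl (fun u number => if number ∈ u then u.erase number else u) unique_solutions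

-- ===== PORT B =====
def pvBand (i : Int) : Int :=
  if i < 3 then 0 else if i < 6 then 1 else 2

-- inner helper 'candidates(r)' of Source B: used = row values ∪ 3x3 block values, then filter base
def bCandidates (sudoku_matrix : List (List Int)) (base : List Int) (column r : Int) : List Int :=
  let used0 : PySem.Set Int :=
    (PySem.List.pyRange 0 (sudoku_matrix.length) 1).foldl
      (fun s j => PySem.Set.add s (pvCell sudoku_matrix r j)) PySem.Set.empty
  let rb := 3 * pvBand r
  let cb := 3 * pvBand column
  let used :=
    (PySem.List.pyRange rb (rb + 3) 1).foldl
      (fun s rr => (PySem.List.pyRange cb (cb + 3) 1).foldl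
        (fun s' cc => PySem.Set.add s' (pvCell sudoku_matrix rr cc)) s) used0
  base.filter (fun o => decide (o ∉ used))

def column_possible_solutions_besides_selected_cell_alt (sudoku_matrix : List (List Int)) (row : Int) (column : Int) : List Int :=
  let p := (PySem.List.pyRange 0 (sudoku_matrix.length) 1).foldl
    (fun (p : PySem.Set Int × List Int) x =>
      if pvCell sudoku_matrix x column = 0 then (p.1, p.2 ++ [x])
      else (PySem.Set.add p.1 (pvCell sudoku_matrix x column), p.2))
    (PySem.Set.empty, [])
  let base := (PySem.List.pyRange 1 ((sudoku_matrix.length : Int) + 1) 1).filter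
    (fun o => decide (o ∉ p.1))
  if base = [] then []
  else
    let forbidden := p.2.foldl
      (fun s x => if x ≠ row then PySem.Set.update s (bCandidates sudoku_matrix base column x) else s)
      PySem.Set.empty
    (bCandidates sudoku_matrix base column row).filter (fun o => decide (o ∉ forbidden))

-- ===== PRECONDITION & SPEC =====
-- Pre_ under-approximates A's return domain in closed form: either a natural square grid whose
-- 3x3 blocks fit (side 0/3/6/9, every row at least side long, -side <= row, column < side), or any
-- grid in which every candidate value 1..len already occurs in the selected column (A then rejects
-- every option at its first test and returns [] before indexing any other row); A also happens to
-- return on some further shapes where the rejection happens only at the row test, excluded because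
-- whether A raises there depends on cell values rather than on the grid's shape.
def Pre_column_possible_solutions_besides_selected_cell (sudoku_matrix : List (List Int)) (row : Int) (column : Int) : Prop :=
  (∀ r ∈ sudoku_matrix, PySem.Raise.InRange r.length column) ∧
  ((1 ≤ sudoku_matrix.length ∧
      ∀ o ∈ PySem.List.pyRange 1 ((sudoku_matrix.length : Int) + 1) 1,
        o ∈ sudoku_matrix.map (fun r => PySem.List.pyGetD r column 0)) ∨
   (sudoku_matrix.length % 3 = 0 ∧ sudoku_matrix.length ≤ 9 ∧
      (sudoku_matrix = [] ∨
        ((∀ r ∈ sudoku_matrix, (sudoku_matrix.length : Int) ≤ r.length) ∧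
         -(sudoku_matrix.length : Int) ≤ row ∧ row < sudoku_matrix.length ∧
         -(sudoku_matrix.length : Int) ≤ column ∧ column < sudoku_matrix.length))))
instance (sudoku_matrix : List (List Int)) (row : Int) (column : Int) : Decidable (Pre_column_possible_solutions_besides_selected_cell sudoku_matrix row column) := by unfold Pre_column_possible_solutions_besides_selected_cell; infer_instance

def pvWitness_column_possible_solutions_besides_selected_cell : List (List Int) × Int × Int :=
  ([[5, 3, 0, 0, 7, 0, 0, 0, 0], [6, 0, 0, 1, 9, 5, 0, 0, 0], [0, 9, 8, 0, 0, 0, 0, 6, 0],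
    [8, 0, 0, 0, 6, 0, 0, 0, 3], [4, 0, 0, 8, 0, 3, 0, 0, 1], [7, 0, 0, 0, 2, 0, 0, 0, 6],
    [0, 6, 0, 0, 0, 0, 2, 8, 0], [0, 0, 0, 4, 1, 9, 0, 0, 5], [0, 0, 0, 0, 8, 0, 0, 7, 9]], 0, 2)

def Spec_column_possible_solutions_besides_selected_cell (sudoku_matrix : List (List Int)) (row : Int) (column : Int) (out : List Int) : Prop := out = column_possible_solutions_besides_selected_cell_alt sudoku_matrix row column
instance (sudoku_matrix : List (List Int)) (row : Int) (column : Int) (out : List Int) : Decidable (Spec_column_possible_solutions_besides_selected_cell sudoku_matrix row column out) := by unfold Spec_column_possible_solutions_besides_selected_cell; infer_instance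

-- ===== CLAIM =====
def Claim_equal_column_possible_solutions_besides_selected_cell : Prop := ∀ (sudoku_matrix : List (List Int)) (row : Int) (column : Int), Dom_column_possible_solutions_besides_selected_cell sudoku_matrix row column → Pre_column_possible_solutions_besides_selected_cell sudoku_matrix row column → Spec_column_possible_solutions_besides_selected_cell sudoku_matrix row column (column_possible_solutions_besides_selected_cell sudoku_matrix row column)

-- ===== LEMMAS AND PROOFS =====

-- the column-values set built by B's first loop (proof-side name for the fold)
def colValsF (m : List (List Int)) (column : Int) : PySem.Set Int :=
  (PySem.List.pyRange 0 (m.length) 1).foldl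
    (fun s x => if pvCell m x column = 0 then s else PySem.Set.add s (pvCell m x column))
    PySem.Set.empty

def baseF (m : List (List Int)) (column : Int) : List Int :=
  (PySem.List.pyRange 1 ((m.length : Int) + 1) 1).filter (fun o => decide (o ∉ colValsF m column))

-- B's pair fold is the pair of the set fold and the empty-row filter
lemma pair_fold_eq (m : List (List Int)) (column : Int) :
    (PySem.List.pyRange 0 (m.length) 1).foldl
      (fun (p : PySem.Set Int × List Int) x =>
        if pvCell m x column = 0 then (p.1, p.2 ++ [x])
        else (PySem.Set.add p.1 (pvCell m x column), p.2))
      (PySem.Set.empty, []) =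
    (colValsF m column,
     (PySem.List.pyRange 0 (m.length) 1).filter (fun x => decide (pvCell m x column = 0))) := by
  have h1 : ∀ (acc : PySem.Set Int × List Int) (x : Int), x ∈ PySem.List.pyRange 0 (m.length) 1 →
      (if pvCell m x column = 0 then (acc.1, acc.2 ++ [x])
       else (PySem.Set.add acc.1 (pvCell m x column), acc.2)) =
      (if pvCell m x column = 0 then acc.1 else PySem.Set.add acc.1 (pvCell m x column),
       if pvCell m x column = 0 then acc.2 ++ [x] else acc.2) := by
    intro acc x _; split <;> rfl
  refine (PySem.List.foldl_congr_mem _ _ _ _ h1).trans ?_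
  rw [PySem.List.foldl_prod_mk
        (f := fun s x => if pvCell m x column = 0 then s else PySem.Set.add s (pvCell m x column))
        (g := fun l x => if pvCell m x column = 0 then l ++ [x] else l),
      PySem.List.foldl_append_ite_eq_filter]
  simp [colValsF]

-- membership in colValsF = membership in A's column_contents
lemma mem_colValsF_iff (m : List (List Int)) (column : Int) (a : Int) :
    a ∈ colValsF m column ↔ a ∈ column_contents column m := by
  unfold colValsF column_contents
  have h1 : ∀ (acc : PySem.Set Int) (x : Int), x ∈ PySem.List.pyRange 0 (m.length) 1 →
      (if pvCell m x column = 0 then acc else PySem.Set.add acc (pvCell m x column)) =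
      (if pvCell m x column ≠ 0 then PySem.Set.add acc (pvCell m x column) else acc) := by
    intro acc x _; by_cases h : pvCell m x column = 0 <;> simp [h]
  rw [PySem.List.foldl_congr_mem _ _ _ _ h1, PySem.List.foldl_ite_eq_foldl_filter,
      PySem.List.foldl_append_ite (p := fun x => pvCell m x column ≠ 0)
        (f := fun x => pvCell m x column)]
  rw [PySem.Set.mem_foldl_add]
  simp only [List.nil_append, List.mem_map, List.mem_filter, PySem.Set.empty,
    List.not_mem_nil, false_or, decide_eq_true_eq]
  aesop

-- membership in a double fold of Set.add (B's 3x3 block loop)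
lemma mem_double_foldl_add (F : Int → Int → Int) (cs : List Int) (a : Int) :
    ∀ (rs : List Int) (s : PySem.Set Int),
      a ∈ rs.foldl (fun s rr => cs.foldl (fun s' cc => PySem.Set.add s' (F rr cc)) s) s ↔
        a ∈ s ∨ ∃ rr ∈ rs, ∃ cc ∈ cs, a = F rr cc := by
  intro rs
  induction rs with
  | nil => intro s; simp
  | cons r t ih =>
      intro s
      simp only [List.foldl_cons, ih, PySem.Set.mem_foldl_add, List.mem_cons]
      constructor
      · rintro (⟨hs | ⟨cc, hcc, rfl⟩⟩ | ⟨rr, hrr, cc, hcc, rfl⟩)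
        · exact Or.inl hs
        · exact Or.inr ⟨r, Or.inl rfl, cc, hcc, rfl⟩
        · exact Or.inr ⟨rr, Or.inr hrr, cc, hcc, rfl⟩
      · rintro (hs | ⟨rr, (rfl | hrr), cc, hcc, rfl⟩)
        · exact Or.inl (Or.inl hs)
        · exact Or.inl (Or.inr ⟨cc, hcc, rfl⟩)
        · exact Or.inr ⟨rr, hrr, cc, hcc, rfl⟩

-- membership in B's used set
lemma mem_bUsed_iff (m : List (List Int)) (column r a : Int) :
    (a ∈ (PySem.List.pyRange (3 * pvBand r) (3 * pvBand r + 3) 1).foldl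
      (fun s rr => (PySem.List.pyRange (3 * pvBand column) (3 * pvBand column + 3) 1).foldl
        (fun s' cc => PySem.Set.add s' (pvCell m rr cc)) s)
      ((PySem.List.pyRange 0 (m.length) 1).foldl
        (fun s j => PySem.Set.add s (pvCell m r j)) PySem.Set.empty)) ↔
    ((∃ j ∈ PySem.List.pyRange 0 (m.length) 1, a = pvCell m r j) ∨
     (∃ rr ∈ PySem.List.pyRange (3 * pvBand r) (3 * pvBand r + 3) 1,
      ∃ cc ∈ PySem.List.pyRange (3 * pvBand column) (3 * pvBand column + 3) 1,
        a = pvCell m rr cc)) := by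
  rw [mem_double_foldl_add, PySem.Set.mem_foldl_add]
  simp [PySem.Set.empty]

-- the nine cells of a 3x3 block, row-major (proof-side)
def blockCells (m : List (List Int)) (R C : Int) : List Int :=
  [pvCell m R C, pvCell m R (C+1), pvCell m R (C+2),
   pvCell m (R+1) C, pvCell m (R+1) (C+1), pvCell m (R+1) (C+2),
   pvCell m (R+2) C, pvCell m (R+2) (C+1), pvCell m (R+2) (C+2)]

lemma mem_blockCells_filter (m : List (List Int)) (a R C : Int) (ha : a ≠ 0) :
    a ∈ (blockCells m R C).filter (fun x => decide (x ≠ 0)) ↔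
    ∃ rr ∈ PySem.List.pyRange R (R + 3) 1, ∃ cc ∈ PySem.List.pyRange C (C + 3) 1,
      a = pvCell m rr cc := by
  have h3 : ∀ S : Int, PySem.List.pyRange S (S + 3) 1 = [S, S + 1, S + 2] := by
    intro S
    rw [PySem.List.pyRange_one_cons (by omega), PySem.List.pyRange_one_cons (by omega),
        PySem.List.pyRange_one_cons (by omega), PySem.List.pyRange_one_eq_nil (by omega)]
    have h : S + 1 + 1 = S + 2 := by omega
    rw [h]
  rw [h3, h3]
  unfold blockCells
  simp only [List.mem_filter, List.mem_cons, List.not_mem_nil, or_false,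
    decide_eq_true_eq, ne_eq, ha, not_false_iff, and_true]
  constructor
  · rintro (h | h | h | h | h | h | h | h | h) <;> subst h
    · exact ⟨R, by simp, C, by simp, rfl⟩
    · exact ⟨R, by simp, C + 1, by simp, rfl⟩
    · exact ⟨R, by simp, C + 2, by simp, rfl⟩
    · exact ⟨R + 1, by simp, C, by simp, rfl⟩
    · exact ⟨R + 1, by simp, C + 1, by simp, rfl⟩
    · exact ⟨R + 1, by simp, C + 2, by simp, rfl⟩
    · exact ⟨R + 2, by simp, C, by simp, rfl⟩
    · exact ⟨R + 2, by simp, C + 1, by simp, rfl⟩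
    · exact ⟨R + 2, by simp, C + 2, by simp, rfl⟩
  · rintro ⟨rr, hrr, cc, hcc, rfl⟩
    rcases hrr with rfl | rfl | rfl <;> rcases hcc with rfl | rfl | rfl <;> tauto

lemma square_contents_0 (m : List (List Int)) :
    square_contents 0 m = (blockCells m 0 0).filter (fun x => decide (x ≠ 0)) := by
  unfold square_contents blockCells
  rw [PySem.List.foldl_append_ite_eq_filter]
  norm_num [square_cells, pysem]
  rfl

lemma square_contents_1 (m : List (List Int)) :
    square_contents 1 m = (blockCells m 0 3).filter (fun x => decide (x ≠ 0)) := by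
  unfold square_contents blockCells
  rw [PySem.List.foldl_append_ite_eq_filter]
  norm_num [square_cells, pysem]
  rfl

lemma square_contents_2 (m : List (List Int)) :
    square_contents 2 m = (blockCells m 0 6).filter (fun x => decide (x ≠ 0)) := by
  unfold square_contents blockCells
  rw [PySem.List.foldl_append_ite_eq_filter]
  norm_num [square_cells, pysem]
  rfl

lemma square_contents_3 (m : List (List Int)) :
    square_contents 3 m = (blockCells m 3 0).filter (fun x => decide (x ≠ 0)) := by
  unfold square_contents blockCells
  rw [PySem.List.foldl_append_ite_eq_filter]
  norm_num [square_cells, pysem]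
  rfl

lemma square_contents_4 (m : List (List Int)) :
    square_contents 4 m = (blockCells m 3 3).filter (fun x => decide (x ≠ 0)) := by
  unfold square_contents blockCells
  rw [PySem.List.foldl_append_ite_eq_filter]
  norm_num [square_cells, pysem]
  rfl

lemma square_contents_5 (m : List (List Int)) :
    square_contents 5 m = (blockCells m 3 6).filter (fun x => decide (x ≠ 0)) := by
  unfold square_contents blockCells
  rw [PySem.List.foldl_append_ite_eq_filter]
  norm_num [square_cells, pysem]
  rfl

lemma square_contents_6 (m : List (List Int)) :
    square_contents 6 m = (blockCells m 6 0).filter (fun x => decide (x ≠ 0)) := by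
  unfold square_contents blockCells
  rw [PySem.List.foldl_append_ite_eq_filter]
  norm_num [square_cells, pysem]
  rfl

lemma square_contents_7 (m : List (List Int)) :
    square_contents 7 m = (blockCells m 6 3).filter (fun x => decide (x ≠ 0)) := by
  unfold square_contents blockCells
  rw [PySem.List.foldl_append_ite_eq_filter]
  norm_num [square_cells, pysem]
  rfl

lemma square_contents_8 (m : List (List Int)) :
    square_contents 8 m = (blockCells m 6 6).filter (fun x => decide (x ≠ 0)) := by
  unfold square_contents blockCells
  rw [PySem.List.foldl_append_ite_eq_filter]
  norm_num [square_cells, pysem]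
  rfl

-- A's square helpers agree with B's band arithmetic (r, c < 9)
set_option maxHeartbeats 1600000 in
lemma mem_square_iff (m : List (List Int)) (r c a : Int) (hr : r < 9) (hc : c < 9) (ha : a ≠ 0) :
    a ∈ square_contents (correct_square_finder r c) m ↔
    ∃ rr ∈ PySem.List.pyRange (3 * pvBand r) (3 * pvBand r + 3) 1,
    ∃ cc ∈ PySem.List.pyRange (3 * pvBand c) (3 * pvBand c + 3) 1,
      a = pvCell m rr cc := by
  have hrb : pvBand r = 0 ∧ r < 3 ∨ pvBand r = 1 ∧ 3 ≤ r ∧ r < 6 ∨ pvBand r = 2 ∧ 6 ≤ r := by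
    unfold pvBand; split_ifs <;> omega
  have hcb : pvBand c = 0 ∧ c < 3 ∨ pvBand c = 1 ∧ 3 ≤ c ∧ c < 6 ∨ pvBand c = 2 ∧ 6 ≤ c := by
    unfold pvBand; split_ifs <;> omega
  rcases hrb with ⟨hbr, hr'⟩ | ⟨hbr, hr1, hr'⟩ | ⟨hbr, hr'⟩ <;>
    rcases hcb with ⟨hbc, hc'⟩ | ⟨hbc, hc1, hc'⟩ | ⟨hbc, hc'⟩ <;>
    [
      (have hK : correct_square_finder r c = 0 := by
         unfold correct_square_finder; split_ifs <;> omega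
       rw [hK, square_contents_0,
           show (3 : Int) * pvBand r = 0 from by rw [hbr]; norm_num,
           show (3 : Int) * pvBand c = 0 from by rw [hbc]; norm_num]
       exact mem_blockCells_filter m a 0 0 ha);
      (have hK : correct_square_finder r c = 1 := by
         unfold correct_square_finder; split_ifs <;> omega
       rw [hK, square_contents_1,
           show (3 : Int) * pvBand r = 0 from by rw [hbr]; norm_num,
           show (3 : Int) * pvBand c = 3 from by rw [hbc]; norm_num]
       exact mem_blockCells_filter m a 0 3 ha);
      (have hK : correct_square_finder r c = 2 := by
         unfold correct_square_finder; split_ifs <;> omega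
       rw [hK, square_contents_2,
           show (3 : Int) * pvBand r = 0 from by rw [hbr]; norm_num,
           show (3 : Int) * pvBand c = 6 from by rw [hbc]; norm_num]
       exact mem_blockCells_filter m a 0 6 ha);
      (have hK : correct_square_finder r c = 3 := by
         unfold correct_square_finder; split_ifs <;> omega
       rw [hK, square_contents_3,
           show (3 : Int) * pvBand r = 3 from by rw [hbr]; norm_num,
           show (3 : Int) * pvBand c = 0 from by rw [hbc]; norm_num]
       exact mem_blockCells_filter m a 3 0 ha);
      (have hK : correct_square_finder r c = 4 := by
         unfold correct_square_finder; split_ifs <;> omega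
       rw [hK, square_contents_4,
           show (3 : Int) * pvBand r = 3 from by rw [hbr]; norm_num,
           show (3 : Int) * pvBand c = 3 from by rw [hbc]; norm_num]
       exact mem_blockCells_filter m a 3 3 ha);
      (have hK : correct_square_finder r c = 5 := by
         unfold correct_square_finder; split_ifs <;> omega
       rw [hK, square_contents_5,
           show (3 : Int) * pvBand r = 3 from by rw [hbr]; norm_num,
           show (3 : Int) * pvBand c = 6 from by rw [hbc]; norm_num]
       exact mem_blockCells_filter m a 3 6 ha);
      (have hK : correct_square_finder r c = 6 := by
         unfold correct_square_finder; split_ifs <;> omega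
       rw [hK, square_contents_6,
           show (3 : Int) * pvBand r = 6 from by rw [hbr]; norm_num,
           show (3 : Int) * pvBand c = 0 from by rw [hbc]; norm_num]
       exact mem_blockCells_filter m a 6 0 ha);
      (have hK : correct_square_finder r c = 7 := by
         unfold correct_square_finder; split_ifs <;> omega
       rw [hK, square_contents_7,
           show (3 : Int) * pvBand r = 6 from by rw [hbr]; norm_num,
           show (3 : Int) * pvBand c = 3 from by rw [hbc]; norm_num]
       exact mem_blockCells_filter m a 6 3 ha);
      (have hK : correct_square_finder r c = 8 := by
         unfold correct_square_finder; split_ifs <;> omega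
       rw [hK, square_contents_8,
           show (3 : Int) * pvBand r = 6 from by rw [hbr]; norm_num,
           show (3 : Int) * pvBand c = 6 from by rw [hbc]; norm_num]
       exact mem_blockCells_filter m a 6 6 ha)]

-- row_contents membership, for a ≠ 0
lemma mem_row_contents_iff (m : List (List Int)) (r a : Int) (ha : a ≠ 0) :
    a ∈ row_contents r m ↔ ∃ j ∈ PySem.List.pyRange 0 (m.length) 1, a = pvCell m r j := by
  unfold row_contents
  rw [PySem.List.foldl_append_ite (p := fun j => pvCell m r j ≠ 0)
        (f := fun j => pvCell m r j)]
  simp only [List.nil_append, List.mem_map, List.mem_filter, decide_eq_true_eq]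
  constructor
  · rintro ⟨j, ⟨hj, _⟩, rfl⟩
    exact ⟨j, hj, rfl⟩
  · rintro ⟨j, hj, rfl⟩
    exact ⟨j, ⟨hj, ha⟩, rfl⟩

-- A's candidate list is a filter of the range
lemma cell_possible_solutions_eq_filter (m : List (List Int)) (r c : Int) :
    cell_possible_solutions m r c =
      (PySem.List.pyRange 0 ((m.length : Int) + 1) 1).filter
        (fun o => decide (o ≠ 0 ∧ o ∉ column_contents c m ∧ o ∉ row_contents r m ∧
                          o ∉ square_contents (correct_square_finder r c) m)) := by
  unfold cell_possible_solutions
  rw [PySem.List.foldl_append_ite_eq_filter]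
  simp

lemma cell_possible_solutions_nodup (m : List (List Int)) (r c : Int) :
    (cell_possible_solutions m r c).Nodup := by
  rw [cell_possible_solutions_eq_filter]
  exact (PySem.List.nodup_pyRange_one 0 _).filter _

-- the central fact: A's per-cell candidates = B's candidates helper (r, column < 9)
lemma cand_eq (m : List (List Int)) (column r : Int) (hr : r < 9) (hc : column < 9) :
    cell_possible_solutions m r column = bCandidates m (baseF m column) column r := by
  rw [cell_possible_solutions_eq_filter, PySem.List.pyRange_one_cons (by omega),
      List.filter_cons_of_neg (by simp)]
  unfold bCandidates baseF
  simp only [List.filter_filter]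
  refine List.filter_congr ?_
  intro o ho
  have h1 : 1 ≤ o := (PySem.List.mem_pyRange_one.mp ho).1
  have ho0 : o ≠ 0 := by omega
  rw [← Bool.decide_and, decide_eq_decide]
  rw [mem_bUsed_iff m column r o]
  constructor
  · rintro ⟨-, hcol, hrow, hsq⟩
    refine ⟨?_, ?_⟩
    · rintro (h | h)
      · exact hrow ((mem_row_contents_iff m r o ho0).mpr h)
      · exact hsq ((mem_square_iff m r column o hr hc ho0).mpr h)
    · intro h
      exact hcol ((mem_colValsF_iff m column o).mp h)
  · rintro ⟨hused, hcv⟩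
    refine ⟨ho0, ?_, ?_, ?_⟩
    · intro h
      exact hcv ((mem_colValsF_iff m column o).mpr h)
    · intro h
      exact hused (Or.inl ((mem_row_contents_iff m r o ho0).mp h))
    · intro h
      exact hused (Or.inr ((mem_square_iff m r column o hr hc ho0).mp h))

-- a value present in the selected column (as Python reads it) is in column_contents
lemma mem_column_contents_of_map (m : List (List Int)) (column o : Int) (ho : o ≠ 0)
    (h : o ∈ m.map (fun r => PySem.List.pyGetD r column 0)) :
    o ∈ column_contents column m := by
  unfold column_contents
  rw [PySem.List.foldl_append_ite (p := fun x => pvCell m x column ≠ 0)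
        (f := fun x => pvCell m x column)]
  simp only [List.nil_append, List.mem_map, List.mem_filter, decide_eq_true_eq]
  rcases List.mem_map.mp h with ⟨rl, hrl, hval⟩
  rcases List.mem_iff_getElem.mp hrl with ⟨i, hi, rfl⟩
  have hcell : pvCell m (i : Int) column = o := by
    unfold pvCell
    rw [PySem.List.pyGetD_natCast, List.getD_eq_getElem _ _ hi]
    exact hval
  refine ⟨(i : Int), ⟨?_, ?_⟩, hcell⟩
  · exact PySem.List.mem_pyRange_one.mpr ⟨by omega, by exact_mod_cast hi⟩
  · rw [hcell]; exact ho

-- A's remove loop on a duplicate-free list is a filter by non-membership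
lemma remove_loop_eq_filter (s : List Int) :
    ∀ u : List Int, u.Nodup →
      s.foldl (fun u number => if number ∈ u then u.erase number else u) u
        = u.filter (fun a => decide (a ∉ s)) := by
  induction s with
  | nil => intro u _; simp
  | cons n t ih =>
      intro u hu
      have hstep : (if n ∈ u then u.erase n else u) = u.filter (fun a => decide (a ≠ n)) := by
        by_cases h : n ∈ u
        · rw [if_pos h, List.Nodup.erase_eq_filter hu]
          apply List.filter_congr
          intro a _
          by_cases h3 : a = n <;> simp [h3, bne]
        · rw [if_neg h]
          symm
          rw [List.filter_eq_self]
          intro a ha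
          simp only [decide_eq_true_eq]
          rintro rfl; exact h ha
      simp only [List.foldl_cons, hstep]
      rw [ih _ (hu.filter _), List.filter_filter]
      apply List.filter_congr
      intro a _
      simp only [List.mem_cons]
      by_cases h1 : a = n <;> by_cases h2 : a ∈ t <;> simp [h1, h2]

-- the erase loop leaves [] at []
lemma foldl_erase_nil (s : List Int) :
    s.foldl (fun u number => if number ∈ u then u.erase number else u) ([] : List Int) = [] := by
  induction s with
  | nil => rfl
  | cons n t ih => simpa using ih

-- membership in B's forbidden set (fold of Set.update with a guard)
lemma mem_update_foldl (g : Int → List Int) (p : Int → Prop) [DecidablePred p] (a : Int) :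
    ∀ (xs : List Int) (s : PySem.Set Int),
      a ∈ xs.foldl (fun s x => if p x then PySem.Set.update s (g x) else s) s ↔
        a ∈ s ∨ ∃ x ∈ xs, p x ∧ a ∈ g x := by
  intro xs
  induction xs with
  | nil => intro s; simp
  | cons x t ih =>
      intro s
      by_cases h : p x
      · simp only [List.foldl_cons, if_pos h, ih, PySem.Set.mem_update, List.mem_cons]
        constructor
        · rintro (⟨hs | hg⟩ | ⟨y, hy, hpy, hgy⟩)
          · exact Or.inl hs
          · exact Or.inr ⟨x, Or.inl rfl, h, hg⟩
          · exact Or.inr ⟨y, Or.inr hy, hpy, hgy⟩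
        · rintro (hs | ⟨y, (rfl | hy), hpy, hgy⟩)
          · exact Or.inl (Or.inl hs)
          · exact Or.inl (Or.inr hgy)
          · exact Or.inr ⟨y, hy, hpy, hgy⟩
      · simp only [List.foldl_cons, if_neg h, ih, List.mem_cons]
        constructor
        · rintro (hs | ⟨y, hy, hpy, hgy⟩)
          · exact Or.inl hs
          · exact Or.inr ⟨y, Or.inr hy, hpy, hgy⟩
        · rintro (hs | ⟨y, (rfl | hy), hpy, hgy⟩)
          · exact Or.inl hs
          · exact absurd hpy h
          · exact Or.inr ⟨y, hy, hpy, hgy⟩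

-- membership in A's concatenated solutions list
lemma mem_append_foldl (g : Int → List Int) (p : Int → Prop) [DecidablePred p] (a : Int)
    (xs : List Int) :
    a ∈ xs.foldl (fun acc x => if p x then acc ++ g x else acc) ([] : List Int) ↔
      ∃ x ∈ xs, p x ∧ a ∈ g x := by
  rw [PySem.List.foldl_ite_eq_foldl_filter, PySem.List.foldl_append_eq_flatMap]
  simp [List.mem_flatMap, List.mem_filter, and_assoc]

-- ===== VERDICT =====
theorem column_possible_solutions_besides_selected_cell_spec : Claim_equal_column_possible_solutions_besides_selected_cell := by
  intro m row column _ hpre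
  unfold Spec_column_possible_solutions_besides_selected_cell
  obtain ⟨hcolpre, hd⟩ := hpre
  unfold column_possible_solutions_besides_selected_cell
    column_possible_solutions_besides_selected_cell_alt
  simp only [pair_fold_eq]
  rw [show ((PySem.List.pyRange 1 ((m.length : Int) + 1) 1).filter
        (fun o => decide (o ∉ colValsF m column))) = baseF m column from rfl]
  by_cases hbase : baseF m column = []
  · rw [if_pos hbase]
    have hcv : ∀ o ∈ PySem.List.pyRange 1 ((m.length : Int) + 1) 1, o ∈ colValsF m column := by
      intro o ho
      by_contra hno
      have := List.filter_eq_nil_iff.mp hbase o ho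
      simp [hno] at this
    have huniq : cell_possible_solutions m row column = [] := by
      rw [cell_possible_solutions_eq_filter]
      apply List.filter_eq_nil_iff.mpr
      intro o ho
      simp only [decide_eq_true_eq, not_and]
      intro ho0 hcol
      rcases PySem.List.mem_pyRange_one.mp ho with ⟨hlo, hhi⟩
      exact absurd ((mem_colValsF_iff m column o).mp
        (hcv o (PySem.List.mem_pyRange_one.mpr ⟨by omega, hhi⟩))) hcol
    rw [huniq]
    exact foldl_erase_nil _
  · rw [if_neg hbase]
    -- the first Pre_ disjunct and the empty grid both force baseF = []
    have hshape : m.length % 3 = 0 ∧ m.length ≤ 9 ∧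
        (∀ r ∈ m, (m.length : Int) ≤ r.length) ∧
        -(m.length : Int) ≤ row ∧ row < m.length ∧
        -(m.length : Int) ≤ column ∧ column < m.length := by
      rcases hd with ⟨hn1, hall⟩ | ⟨h3, h9, hm | hsh⟩
      · exfalso
        apply hbase
        apply List.filter_eq_nil_iff.mpr
        intro o ho
        have h1 : 1 ≤ o := (PySem.List.mem_pyRange_one.mp ho).1
        simp only [decide_eq_true_eq, not_not]
        exact (mem_colValsF_iff m column o).mpr
          (mem_column_contents_of_map m column o (by omega) (hall o ho))
      · exfalso
        apply hbase
        unfold baseF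
        rw [hm]
        simp
      · exact ⟨h3, h9, hsh.1, hsh.2.1, hsh.2.2.1, hsh.2.2.2.1, hsh.2.2.2.2⟩
    obtain ⟨h3, h9, hrows, hrlo, hrhi, hclo, hchi⟩ := hshape
    have hrow9 : row < 9 := by omega
    have hcol9 : column < 9 := by omega
    rw [remove_loop_eq_filter _ _ (cell_possible_solutions_nodup m row column),
        cand_eq m column row hrow9 hcol9]
    apply List.filter_congr
    intro a _
    simp only [decide_eq_decide, not_iff_not]
    rw [mem_append_foldl (fun x => cell_possible_solutions m x column)
          (fun x => pvCell m x column = 0 ∧ x ≠ row) a,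
        mem_update_foldl (fun x => bCandidates m (baseF m column) column x)
          (fun x => x ≠ row) a]
    simp only [PySem.Set.empty, List.not_mem_nil, false_or, List.mem_filter,
      decide_eq_true_eq]
    constructor
    · rintro ⟨x, hx, ⟨hz, hne⟩, hmem⟩
      have hx9 : x < 9 := by
        have := (PySem.List.mem_pyRange_one.mp hx).2
        omega
      exact ⟨x, ⟨hx, hz⟩, hne, by rw [← cand_eq m column x hx9 hcol9]; exact hmem⟩
    · rintro ⟨x, ⟨hx, hz⟩, hne, hmem⟩
      have hx9 : x < 9 := by
        have := (PySem.List.mem_pyRange_one.mp hx).2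
        omega
      exact ⟨x, hx, ⟨hz, hne⟩, by rw [cand_eq m column x hx9 hcol9]; exact hmem⟩
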